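-- pv_equiv track=rewrite | github.com/JSCshir/Work | Work.py | permutations2
-- ===== SOURCE A (Python) =====
-- def permutations2(s):
--     perm = list(s)
--     ltr = []
--     for i in range(len(perm)):
--         a = perm[len(perm) - 1]
--         perm = perm[:-1]
--         perm.insert(0, a)
--         ltr.append(perm)
--     lts = ["".join(row) for row in ltr]
--     return lts
-- ===== SOURCE B (Python) =====
-- def permutations2(s):
--     seq = list(s)
--     return ["".join(seq[-(i + 1):] + seq[:-(i + 1)]) for i in range(len(seq))]
-- ===== Notes on version B (the rewrite author's own statement) =====
-- stated objective: simpler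
-- what changed: Replaces the stateful pop-last/insert-front loop that mutates a running list with a single comprehension computing each right-rotation independently from the original by slicing.
import Mathlib
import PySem

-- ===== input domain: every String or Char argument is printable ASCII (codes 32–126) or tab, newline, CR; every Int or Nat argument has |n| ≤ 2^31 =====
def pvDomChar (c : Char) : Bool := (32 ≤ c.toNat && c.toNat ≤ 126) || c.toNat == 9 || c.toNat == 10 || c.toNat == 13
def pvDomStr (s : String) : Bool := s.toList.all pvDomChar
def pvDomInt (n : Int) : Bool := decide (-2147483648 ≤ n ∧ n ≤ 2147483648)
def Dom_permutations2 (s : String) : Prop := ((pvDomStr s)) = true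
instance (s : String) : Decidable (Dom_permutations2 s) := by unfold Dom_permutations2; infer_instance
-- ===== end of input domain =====

-- B replaces A's stateful pop-last/insert-front loop with a comprehension that
-- derives each right-rotation independently from the original string by slicing (objective: simpler).


-- ===== PORT A =====
-- step for step: a = perm[len(perm)-1]; perm = perm[:-1]; perm.insert(0, a); ltr.append(perm)
def permutations2 (s : String) : List String :=
  let perm0 := s.toList
  let st := (List.range perm0.length).foldl
    (fun (st : List Char × List (List Char)) _ =>
      let a := PySem.List.pyGetD st.1 (PySem.List.len st.1 - 1) ' '
      let perm := PySem.List.slice st.1 none (some (-1))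
      let perm := PySem.List.insert perm 0 a
      (perm, st.2 ++ [perm]))
    (perm0, ([] : List (List Char)))
  st.2.map (fun row => String.ofList row)

-- ===== PORT B =====
-- ["".join(seq[-(i+1):] + seq[:-(i+1)]) for i in range(len(seq))]
def permutations2_alt (s : String) : List String :=
  let seq := s.toList
  (PySem.List.pyRange 0 (PySem.List.len seq) 1).map (fun i =>
    String.ofList (PySem.List.slice seq (some (-(i + 1))) none
                   ++ PySem.List.slice seq none (some (-(i + 1)))))

-- ===== PRECONDITION & SPEC =====
def Spec_permutations2 (s : String) (out : List String) : Prop := out = permutations2_alt s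
instance (s : String) (out : List String) : Decidable (Spec_permutations2 s out) := by unfold Spec_permutations2; infer_instance

-- ===== CLAIM (what is proved, stated in full; the proofs are below) =====
def Claim_equal_permutations2 : Prop := ∀ (s : String), Dom_permutations2 s → Spec_permutations2 s (permutations2 s)

-- ===== LEMMAS AND PROOFS =====

/-- the k-th right rotation of `l` -/
def pvRot (l : List Char) (k : Nat) : List Char :=
  l.drop (l.length - k) ++ l.take (l.length - k)

lemma pvRot_zero (l : List Char) : pvRot l 0 = l := by
  simp [pvRot]

lemma pvRot_length (l : List Char) (k : Nat) : (pvRot l k).length = l.length := by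
  simp [pvRot]

/-- one loop step advances the rotation -/
lemma pvRot_succ (l : List Char) (m : Nat) (hm : m < l.length) :
    pvRot l m = l.drop (l.length - (m + 1) + 1) ++ l.take (l.length - (m + 1))
                ++ [l[l.length - (m + 1)]'(by omega)] ∧
    pvRot l (m + 1) = l[l.length - (m + 1)]'(by omega) ::
                (l.drop (l.length - (m + 1) + 1) ++ l.take (l.length - (m + 1))) := by
  have h2 : l.length - (m + 1) < l.length := by omega
  constructor
  · have hnm : l.length - m = (l.length - (m + 1)) + 1 := by omega
    have hts : l.take ((l.length - (m + 1)) + 1)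
        = l.take (l.length - (m + 1)) ++ [l[l.length - (m + 1)]'h2] := by
      rw [List.take_add_one]; simp [List.getElem?_eq_getElem h2]
    simp only [pvRot, hnm, hts]
    simp
  · have hds : l.drop (l.length - (m + 1))
        = l[l.length - (m + 1)]'h2 :: l.drop (l.length - (m + 1) + 1) :=
      List.drop_eq_getElem_cons h2
    unfold pvRot
    rw [hds, List.cons_append]

/-- invariant of A's loop -/
lemma pvLoop (l : List Char) (m : Nat) (hm : m ≤ l.length) :
    (List.range m).foldl
      (fun (st : List Char × List (List Char)) _ =>
        let a := PySem.List.pyGetD st.1 (PySem.List.len st.1 - 1) ' '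
        let perm := PySem.List.slice st.1 none (some (-1))
        let perm := PySem.List.insert perm 0 a
        (perm, st.2 ++ [perm]))
      (l, ([] : List (List Char)))
    = (pvRot l m, (List.range m).map (fun j => pvRot l (j + 1))) := by
  induction m with
  | zero => simp [pvRot_zero]
  | succ m ih =>
    have hm' : m < l.length := by omega
    rw [List.range_succ, List.foldl_append, ih (by omega), List.map_append]
    obtain ⟨hsplit, hnext⟩ := pvRot_succ l m hm'
    have hlen : (pvRot l m).length = l.length := pvRot_length l m
    have hidx : PySem.List.len (pvRot l m) - 1 = ((l.length - 1 : Nat) : Int) := by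
      simp [PySem.List.len_eq, hlen]; omega
    simp only [List.foldl_cons, List.foldl_nil, List.map_cons, List.map_nil]
    rw [hidx, PySem.List.pyGetD_natCast, PySem.List.slice_to_neg_one, PySem.List.insert_zero]
    have hget : (pvRot l m).getD (l.length - 1) ' '
        = l[l.length - (m + 1)]'(by omega) := by
      rw [hsplit]
      have hX : (l.drop (l.length - (m + 1) + 1) ++ l.take (l.length - (m + 1))).length
          = l.length - 1 := by simp; omega
      rw [List.getD_eq_getElem?_getD, ← hX, List.getElem?_append_right le_rfl]
      simp
    have hdl : (pvRot l m).dropLast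
        = l.drop (l.length - (m + 1) + 1) ++ l.take (l.length - (m + 1)) := by
      rw [hsplit, List.dropLast_concat]
    rw [hget, hdl, ← hnext]

/-- B's slice pair is the rotation -/
lemma pvSlice_rot (l : List Char) (k : Nat) :
    PySem.List.slice l (some (-((k : Int) + 1))) none
      ++ PySem.List.slice l none (some (-((k : Int) + 1))) = pvRot l (k + 1) := by
  have h1 : -((k : Int) + 1) = -(((k + 1 : Nat) : Int)) := by push_cast; ring
  rw [h1, PySem.List.slice_from_neg_natCast l (k + 1) (by omega),
      PySem.List.slice_to_neg_natCast l (k + 1) (by omega), pvRot]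

-- ===== VERDICT (by name: the statement is the Claim_ definition above) =====
theorem permutations2_spec : Claim_equal_permutations2 := by
  intro s _
  unfold Spec_permutations2 permutations2 permutations2_alt
  simp only
  rw [pvLoop s.toList s.toList.length le_rfl]
  rw [PySem.List.len_eq, PySem.List.pyRange_one, List.map_map, List.map_map]
  have hnt : (((s.toList.length : Int)) - 0).toNat = s.toList.length := by omega
  rw [hnt]
  apply List.map_congr_left
  intro k _
  simp only [Function.comp, zero_add]
  rw [pvSlice_rot s.toList k]
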